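-- pv_equiv track=rewrite | github.com/bongbro1/lichhocapi | domains/ictu/schedule.py | compute_time_range
-- ===== SOURCE A (Python) =====
-- from typing import Tuple, Optional
--
-- PERIODS = [
--     (6, 45), (7, 35), (8, 25), (9, 15), (10, 5),   # Sáng
--     (13, 0), (13, 50), (14, 40), (15, 30), (16, 20), # Chiều
--     (18, 15), (19, 5), (19, 55), (20, 45), (21, 35)  # Tối
-- ]
--
-- def compute_time_range(start_period: int, end_period: int) -> Tuple[str, str]:
--     hour, minute = PERIODS[start_period]
--     time_start = f"{hour:02d}:{minute:02d}"
--
--     current_hour, current_minute = hour, minute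
--     for p in range(start_period, end_period + 1):
--         current_minute += 50
--         if p % 5 == 1: current_minute += 10
--         else: current_minute += 5
--         current_hour += current_minute // 60
--         current_minute = current_minute % 60
--
--     time_end = f"{current_hour:02d}:{current_minute:02d}"
--     return time_start, time_end
-- ===== SOURCE B (Python) =====
-- PERIODS = [
--     (6, 45), (7, 35), (8, 25), (9, 15), (10, 5),
--     (13, 0), (13, 50), (14, 40), (15, 30), (16, 20),
--     (18, 15), (19, 5), (19, 55), (20, 45), (21, 35)
-- ]
--
-- def compute_time_range(start_period, end_period):
--     hour, minute = PERIODS[start_period]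
--     n = end_period - start_period + 1
--     if n <= 0:
--         total = 0
--     else:
--         # each period adds 55 minutes, plus 5 extra for each p with p % 5 == 1
--         total = 55 * n + 5 * ((end_period + 4) // 5 - (start_period + 3) // 5)
--     t = hour * 60 + minute + total
--     return "%02d:%02d" % (hour, minute), "%02d:%02d" % (t // 60, t % 60)
-- ===== Notes on version B (the rewrite author's own statement) =====
-- stated objective: faster
-- what changed: Replaces A's per-period minute-carry loop with a closed form: total minutes = 55*n + 5*(count of periods p in [start,end] with p%5==1 via a floor-division interval-residue formula), then one divmod to get the end time.
-- outside the precondition, e.g. on compute_time_range(15, 16): A raises IndexError, B raises IndexError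
import Mathlib
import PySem

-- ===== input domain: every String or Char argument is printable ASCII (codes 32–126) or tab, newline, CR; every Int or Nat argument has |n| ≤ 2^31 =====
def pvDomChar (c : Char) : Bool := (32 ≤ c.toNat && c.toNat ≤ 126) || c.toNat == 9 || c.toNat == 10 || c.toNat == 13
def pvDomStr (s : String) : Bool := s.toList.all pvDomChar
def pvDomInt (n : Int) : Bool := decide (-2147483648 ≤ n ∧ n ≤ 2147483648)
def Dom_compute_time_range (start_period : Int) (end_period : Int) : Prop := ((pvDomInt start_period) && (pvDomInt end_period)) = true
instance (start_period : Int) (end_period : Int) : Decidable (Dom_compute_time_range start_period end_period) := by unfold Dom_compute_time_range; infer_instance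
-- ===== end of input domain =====

-- B replaces A's per-period carry loop by a closed form (55·n plus an interval-residue
-- count of the long breaks) — objective: faster (O(1) vs O(n) in the period span).
-- ===== PORT A =====
def pvPERIODS : List (Int × Int) :=
  [(6, 45), (7, 35), (8, 25), (9, 15), (10, 5),
   (13, 0), (13, 50), (14, 40), (15, 30), (16, 20),
   (18, 15), (19, 5), (19, 55), (20, 45), (21, 35)]

-- f"{n:02d}" — exact for width 2 (f-string pads with '0' only when the rendering is shorter than 2)
def pvFmt02 (n : Int) : String :=
  if 0 ≤ n ∧ n < 10 then "0" ++ PySem.Int.toStr n else PySem.Int.toStr n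

def pvStepA (st : Int × Int) (p : Int) : Int × Int :=
  let m1 := st.2 + 50
  let m2 := if PySem.Int.mod p 5 = 1 then m1 + 10 else m1 + 5
  (st.1 + PySem.Int.floordiv m2 60, PySem.Int.mod m2 60)

def compute_time_range (start_period : Int) (end_period : Int) : String × String :=
  match PySem.List.pyGet? pvPERIODS start_period with
  | none => ("", "")  -- IndexError in Python; excluded by Pre_
  | some (hour, minute) =>
    let time_start := pvFmt02 hour ++ ":" ++ pvFmt02 minute
    let res := (PySem.List.pyRange start_period (end_period + 1) 1).foldl pvStepA (hour, minute)
    (time_start, pvFmt02 res.1 ++ ":" ++ pvFmt02 res.2)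

-- ===== PORT B =====
def compute_time_range_alt (start_period : Int) (end_period : Int) : String × String :=
  match PySem.List.pyGet? pvPERIODS start_period with
  | none => ("", "")  -- IndexError in Python; excluded by Pre_
  | some (hour, minute) =>
    let n := end_period - start_period + 1
    let total : Int :=
      if n ≤ 0 then 0
      else 55 * n + 5 * (PySem.Int.floordiv (end_period + 4) 5
                         - PySem.Int.floordiv (start_period + 3) 5)
    let t := hour * 60 + minute + total
    (pvFmt02 hour ++ ":" ++ pvFmt02 minute,
     pvFmt02 (PySem.Int.floordiv t 60) ++ ":" ++ pvFmt02 (PySem.Int.mod t 60))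

-- ===== PRECONDITION & SPEC =====
-- PERIODS has 15 entries: PERIODS[start_period] raises IndexError outside [-15, 15).
def Pre_compute_time_range (start_period : Int) (end_period : Int) : Prop :=
  -15 ≤ start_period ∧ start_period < 15
instance (start_period : Int) (end_period : Int) : Decidable (Pre_compute_time_range start_period end_period) := by unfold Pre_compute_time_range; infer_instance

def pvWitness_compute_time_range : Int × Int := (1, 3)

def Spec_compute_time_range (start_period : Int) (end_period : Int) (out : String × String) : Prop := out = compute_time_range_alt start_period end_period
instance (start_period : Int) (end_period : Int) (out : String × String) : Decidable (Spec_compute_time_range start_period end_period out) := by unfold Spec_compute_time_range; infer_instance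

-- ===== CLAIM (what is proved, stated in full; the proofs are below) =====
def Claim_equal_compute_time_range : Prop := ∀ (start_period : Int) (end_period : Int), Dom_compute_time_range start_period end_period → Pre_compute_time_range start_period end_period → Spec_compute_time_range start_period end_period (compute_time_range start_period end_period)

-- ===== LEMMAS AND PROOFS =====

-- the minutes each loop iteration of A adds for period p
def pvInc (p : Int) : Int := if PySem.Int.mod p 5 = 1 then 60 else 55

theorem pvFdivmodBase (h m : Int) (h0 : 0 ≤ m) (h1 : m < 60) :
    PySem.Int.floordiv (h * 60 + m) 60 = h ∧ PySem.Int.mod (h * 60 + m) 60 = m := by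
  rw [PySem.Int.floordiv_eq_ediv_of_pos (by omega), PySem.Int.mod_eq_emod_of_pos (by omega)]
  omega

theorem pvFoldChar (L : List Int) (h m : Int) (h0 : 0 ≤ m) (h1 : m < 60) :
    L.foldl pvStepA (h, m)
      = (PySem.Int.floordiv (h * 60 + m + (L.map pvInc).sum) 60,
         PySem.Int.mod (h * 60 + m + (L.map pvInc).sum) 60) := by
  induction L generalizing h m with
  | nil =>
    simp only [List.foldl_nil, List.map_nil, List.sum_nil, add_zero]
    obtain ⟨hd, hm⟩ := pvFdivmodBase h m h0 h1
    rw [hd, hm]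
  | cons p L ih =>
    simp only [List.foldl_cons, List.map_cons, List.sum_cons]
    have hstep : pvStepA (h, m) p
        = (h + PySem.Int.floordiv (m + pvInc p) 60, PySem.Int.mod (m + pvInc p) 60) := by
      simp only [pvStepA, pvInc]
      split_ifs with hc <;> ring_nf
    rw [hstep, ih _ _ (PySem.Int.mod_nonneg _ (by omega)) (PySem.Int.mod_lt _ (by omega))]
    have hk := PySem.Int.floordiv_mul_add_mod (m + pvInc p) 60
    have harg : (h + PySem.Int.floordiv (m + pvInc p) 60) * 60 + PySem.Int.mod (m + pvInc p) 60
        + (L.map pvInc).sum = h * 60 + m + (pvInc p + (L.map pvInc).sum) := by omega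
    rw [harg]

theorem pvIncClosed (s : Int) :
    pvInc s = 55 + 5 * (PySem.Int.floordiv (s + 4) 5 - PySem.Int.floordiv (s + 3) 5) := by
  simp only [pvInc, PySem.Int.mod_eq_emod_of_pos (a := s) (by omega : (0:Int) < 5),
    PySem.Int.floordiv_eq_ediv_of_pos (by omega : (0:Int) < 5)]
  split_ifs with hc <;> omega

theorem pvSumRange (n : Nat) (s : Int) :
    ((PySem.List.pyRange s (s + n) 1).map pvInc).sum
      = 55 * n + 5 * (PySem.Int.floordiv (s + n + 3) 5 - PySem.Int.floordiv (s + 3) 5) := by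
  induction n generalizing s with
  | zero => simp [PySem.List.pyRange_one_eq_nil (le_refl s)]
  | succ n ih =>
    rw [PySem.List.pyRange_one_cons (by push_cast; omega)]
    have he : s + ((n : Int) + 1) = (s + 1) + n := by ring
    push_cast
    rw [he]
    simp only [List.map_cons, List.sum_cons, ih (s + 1)]
    rw [pvIncClosed s]
    have h1 : s + 1 + (n : Int) + 3 = s + ((n : Int) + 1) + 3 := by ring
    have h2 : s + 1 + 3 = s + 4 := by ring
    rw [h1, h2]
    ring

theorem pvMainEq (s e h m : Int)
    (hget : PySem.List.pyGet? pvPERIODS s = some (h, m)) (h0 : 0 ≤ m) (h1 : m < 60) :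
    compute_time_range s e = compute_time_range_alt s e := by
  simp only [compute_time_range, compute_time_range_alt, hget]
  by_cases hle : e + 1 ≤ s
  · rw [PySem.List.pyRange_one_eq_nil hle]
    simp only [List.foldl_nil, if_pos (show e - s + 1 ≤ 0 by omega), add_zero]
    obtain ⟨hd, hm⟩ := pvFdivmodBase h m h0 h1
    rw [hd, hm]
  · have hn : (0:Int) < e + 1 - s := by omega
    have hN : e + 1 = s + ((e + 1 - s).toNat : Int) := by omega
    rw [hN, pvFoldChar _ _ _ h0 h1, pvSumRange ((e + 1 - s).toNat) s]
    rw [if_neg (show ¬ e - s + 1 ≤ 0 by omega)]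
    have h3 : s + ((e + 1 - s).toNat : Int) + 3 = e + 4 := by omega
    have h4 : (55:Int) * ((e + 1 - s).toNat : Int) = 55 * (e - s + 1) := by
      have : ((e + 1 - s).toNat : Int) = e - s + 1 := by omega
      rw [this]
    rw [h3, h4]

-- ===== VERDICT (by name: the statement is the Claim_ definition above) =====
theorem compute_time_range_spec : Claim_equal_compute_time_range := by
  intro s e _ hpre
  unfold Spec_compute_time_range
  obtain ⟨hl, hr⟩ := hpre
  have hrange : PySem.Raise.InRange pvPERIODS.length s := by
    simp only [pvPERIODS]
    constructor <;> simp <;> omega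
  obtain ⟨pr, hget⟩ : ∃ pr, PySem.List.pyGet? pvPERIODS s = some pr := by
    cases hg : PySem.List.pyGet? pvPERIODS s with
    | none => exact absurd ((PySem.List.pyGet?_eq_none_iff _ _).mp hg) (by simpa using hrange)
    | some pr => exact ⟨pr, rfl⟩
  have hmem := PySem.List.mem_of_pyGet?_eq_some _ hget
  have hbound : 0 ≤ pr.2 ∧ pr.2 < 60 := by
    have hall : ∀ q ∈ pvPERIODS, 0 ≤ q.2 ∧ q.2 < 60 := by decide
    exact hall pr hmem
  exact pvMainEq s e pr.1 pr.2 (by rw [hget]) hbound.1 hbound.2
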